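-- pv_equiv track=rewrite | github.com/lukaslao/POKER10JQKA | pokerlogic.py | maotrincarank
-- ===== SOURCE A (Python) =====
-- def trincarank(r, n) :
--
--     """Define the RANKS of 3's o kind
--     Turn the hand into its values: 20, 30 ,40...
--     RANK RANGES from 350 to 353 so it wins of a 2 PAIR
--     lowest 3ofkind of 2's = 350, 3's= 351 ....
--     bigget 3ofkind ACE's = 363"""
--
--     trinca = []
--     for p, q in zip(r, n) :
--         if r.count(p) == 3:
--             trinca.append(p)
--     trinca.sort(reverse=True)
--     return trinca
--
-- def maotrincarank(r, n):
--     trinca = trincarank(r, n)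
--     if not trinca :
--         rankmao = 0
--     else:
--         numero = list(range(20,141,10))
--         ranktrinca = list(range(350,364))
--         rankmao = 0
--         for n, r in zip(numero, ranktrinca):
--             if trinca[0] == n:
--                 rankmao = r
--     return rankmao
-- ===== SOURCE B (Python) =====
-- def maotrincarank(r, n):
--     cnt = {}
--     for x in r:
--         cnt[x] = cnt.get(x, 0) + 1
--     best = None
--     for x in r[:len(n)]:
--         if cnt[x] == 3 and (best is None or x > best):
--             best = x
--     if best is None:
--         return 0
--     if 20 <= best <= 140 and (best - 20) % 10 == 0:
--         return 350 + (best - 20) // 10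
--     return 0
-- ===== Notes on version B (the rewrite author's own statement) =====
-- stated objective: faster
-- what changed: Replaces A's O(len(r)) count call per card, descending sort of the triples and 13-entry parallel-list table scan with one counting-dict pass, a single running-max scan over r[:len(n)], and closed-form rank arithmetic 350 + (v-20)//10 guarded by the exact range/step test.
import Mathlib
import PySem

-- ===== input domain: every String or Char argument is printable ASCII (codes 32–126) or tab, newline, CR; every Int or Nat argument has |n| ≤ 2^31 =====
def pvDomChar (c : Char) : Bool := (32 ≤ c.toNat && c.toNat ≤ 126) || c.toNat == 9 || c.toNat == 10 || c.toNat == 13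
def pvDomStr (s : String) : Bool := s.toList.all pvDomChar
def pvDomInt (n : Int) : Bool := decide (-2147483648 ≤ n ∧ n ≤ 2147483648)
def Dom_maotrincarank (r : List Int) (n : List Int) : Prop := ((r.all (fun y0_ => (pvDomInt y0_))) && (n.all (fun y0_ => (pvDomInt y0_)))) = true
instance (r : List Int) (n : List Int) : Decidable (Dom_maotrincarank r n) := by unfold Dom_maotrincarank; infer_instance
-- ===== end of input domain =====

-- B replaces A's per-card count loop, descending sort and 13-entry table scan by one
-- counting pass, one running-max scan and closed-form arithmetic (same return value).

-- ===== PORT A =====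
-- trincarank: collect every p paired by zip(r, n) with r.count(p) == 3, then sort descending
def trincarankPort (r : List Int) (n : List Int) : List Int :=
  let trinca := (List.zip r n).foldl
    (fun acc pq => if PySem.List.count r pq.1 = 3 then acc ++ [pq.1] else acc) []
  PySem.List.sorted trinca (fun x => x) true

def maotrincarank (r : List Int) (n : List Int) : Int :=
  let trinca := trincarankPort r n
  match trinca with
  | [] => 0
  | t0 :: _ =>
    let numero := PySem.List.pyRange 20 141 10
    let ranktrinca := PySem.List.pyRange 350 364 1
    (List.zip numero ranktrinca).foldl
      (fun rankmao nr => if t0 = nr.1 then nr.2 else rankmao) 0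

-- ===== PORT B =====
def maotrincarank_alt (r : List Int) (n : List Int) : Int :=
  let cnt : PySem.Dict Int Int := r.foldl (fun d x => d.insert x (d.getD x 0 + 1)) PySem.Dict.empty
  let best : Option Int := (PySem.List.slice r none (some (n.length : Int))).foldl
    (fun b x =>
      if cnt.getD x 0 = 3 then
        match b with
        | none => some x
        | some m => if x > m then some x else b
      else b) none
  match best with
  | none => 0
  | some v =>
    if 20 ≤ v ∧ v ≤ 140 ∧ PySem.Int.mod (v - 20) 10 = 0 then
      350 + PySem.Int.floordiv (v - 20) 10
    else 0

-- ===== PRECONDITION & SPEC =====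
def Spec_maotrincarank (r : List Int) (n : List Int) (out : Int) : Prop := out = maotrincarank_alt r n
instance (r : List Int) (n : List Int) (out : Int) : Decidable (Spec_maotrincarank r n out) := by unfold Spec_maotrincarank; infer_instance

-- ===== CLAIM (what is proved, stated in full; the proofs are below) =====
def Claim_equal_maotrincarank : Prop := ∀ (r : List Int) (n : List Int), Dom_maotrincarank r n → Spec_maotrincarank r n (maotrincarank r n)

-- ===== LEMMAS AND PROOFS =====

-- the first components zip(r, n) pairs up are exactly r[:len(n)]
theorem map_fst_zip_eq_take (r n : List Int) :
    List.map (fun pq : Int × Int => pq.1) (r.zip n) = List.take n.length r := by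
  induction r generalizing n with
  | nil => simp
  | cons a t ih => cases n with
    | nil => simp
    | cons b m => simp [ih]

-- filtering on the first component before projecting = projecting then filtering
theorem map_filter_fst (r n : List Int) (p : Int → Bool) :
    List.map (fun pq : Int × Int => pq.1) (List.filter (fun pq : Int × Int => p pq.1) (r.zip n)) =
      List.filter p (List.take n.length r) := by
  rw [← map_fst_zip_eq_take]
  induction (r.zip n) with
  | nil => simp
  | cons a t ih => by_cases h : p a.1 <;> simp [h, ih]

-- B's hand-built counting dict reads back as List.count
theorem cntFold_getD (r : List Int) (d : PySem.Dict Int Int) (v : Int) :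
    (r.foldl (fun d x => d.insert x (d.getD x 0 + 1)) d).getD v 0
      = d.getD v 0 + (r.count v : Int) := by
  induction r generalizing d with
  | nil => simp
  | cons a t ih =>
    simp only [List.foldl_cons, ih, PySem.Dict.getD_insert, List.count_cons]
    by_cases h : v = a
    · simp [h]; ring
    · have h2 : (a == v) = false := by simp; exact fun e => h e.symm
      simp [h, h2]

-- running-max accumulator invariant
theorem maxFold_go (l : List Int) (a : Int) :
    ∃ M, l.foldl
        (fun b x => match b with | none => some x | some m => if x > m then some x else b)
        (some a) = some M ∧ (M = a ∨ M ∈ l) ∧ a ≤ M ∧ ∀ y ∈ l, y ≤ M := by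
  induction l generalizing a with
  | nil => exact ⟨a, rfl, Or.inl rfl, le_refl a, by simp⟩
  | cons x t ih =>
    simp only [List.foldl_cons]
    by_cases h : x > a
    · simp only [if_pos h]
      obtain ⟨M, hM, hmem, hle, hub⟩ := ih x
      exact ⟨M, hM, by rcases hmem with h1 | h1 <;> simp [h1], le_trans (le_of_lt h) hle,
        by intro y hy; rcases List.mem_cons.mp hy with rfl | hy; exact hle; exact hub y hy⟩
    · simp only [if_neg h]
      obtain ⟨M, hM, hmem, hle, hub⟩ := ih a
      exact ⟨M, hM, by rcases hmem with h1 | h1 <;> simp [h1], hle,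
        by intro y hy; rcases List.mem_cons.mp hy with rfl | hy; exact le_trans (by omega) hle; exact hub y hy⟩

-- B's running-max loop over a nonempty list returns a maximum element's value
theorem maxFold_spec (l : List Int) (hl : l ≠ []) :
    ∃ M, l.foldl
        (fun b x => match b with | none => some x | some m => if x > m then some x else b)
        (none : Option Int) = some M ∧ M ∈ l ∧ ∀ y ∈ l, y ≤ M := by
  cases l with
  | nil => exact absurd rfl hl
  | cons x t =>
    simp only [List.foldl_cons]
    obtain ⟨M, hM, hmem, hle, hub⟩ := maxFold_go t x
    exact ⟨M, hM, by rcases hmem with h1 | h1 <;> simp [h1],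
      by intro y hy; rcases List.mem_cons.mp hy with rfl | hy; exact hle; exact hub y hy⟩

-- B's max loop with the test inside = the plain max loop over the filtered list
theorem bestFold_eq_filter (l : List Int) (p : Int → Prop) [DecidablePred p] :
    l.foldl
        (fun b x => if p x then
            (match b with | none => some x | some m => if x > m then some x else b)
          else b) (none : Option Int)
      = (l.filter (fun x => decide (p x))).foldl
          (fun b x => match b with | none => some x | some m => if x > m then some x else b)
          (none : Option Int) := by
  suffices h : ∀ (b : Option Int), l.foldl
        (fun b x => if p x then
            (match b with | none => some x | some m => if x > m then some x else b)
          else b) b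
      = (l.filter (fun x => decide (p x))).foldl
          (fun b x => match b with | none => some x | some m => if x > m then some x else b) b from h none
  induction l with
  | nil => intro b; rfl
  | cons x t ih => intro b; by_cases h : p x <;> simp [h, ih]

-- A's 13-entry lookup loop computes B's closed-form arithmetic
set_option maxHeartbeats 2000000 in
theorem lookup_eq_arith (v : Int) :
    (List.zip (PySem.List.pyRange 20 141 10) (PySem.List.pyRange 350 364 1)).foldl
        (fun rankmao nr => if v = nr.1 then nr.2 else rankmao) 0
      = (if 20 ≤ v ∧ v ≤ 140 ∧ PySem.Int.mod (v - 20) 10 = 0 then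
           350 + PySem.Int.floordiv (v - 20) 10
         else 0) := by
  have h10 : (0:Int) < 10 := by norm_num
  rw [PySem.Int.mod_eq_emod_of_pos (h10), PySem.Int.floordiv_eq_ediv_of_pos (h10)]
  have : List.zip (PySem.List.pyRange 20 141 10) (PySem.List.pyRange 350 364 1)
      = [(20,350),(30,351),(40,352),(50,353),(60,354),(70,355),(80,356),(90,357),(100,358),(110,359),(120,360),(130,361),(140,362)] := by decide
  rw [this]
  simp only [List.foldl]
  split_ifs <;> omega

theorem main_eq (r n : List Int) : maotrincarank r n = maotrincarank_alt r n := by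
  have hA : (List.zip r n).foldl
      (fun acc pq => if PySem.List.count r pq.1 = 3 then acc ++ [pq.1] else acc) []
      = (r.take n.length).filter (fun x => decide (PySem.List.count r x = 3)) := by
    have h := PySem.List.foldl_append_if (fun pq : Int × Int => decide (PySem.List.count r pq.1 = 3))
        (fun pq => pq.1) (List.zip r n) []
    simp only [decide_eq_true_eq] at h
    rw [h, List.nil_append]
    exact map_filter_fst r n (fun x => decide (PySem.List.count r x = 3))
  have hcnt : ∀ x, ((r.foldl (fun d x => d.insert x (d.getD x 0 + 1))
        (PySem.Dict.empty : PySem.Dict Int Int)).getD x 0 = 3) ↔ PySem.List.count r x = 3 := by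
    intro x
    rw [cntFold_getD]
    simp [PySem.List.count_eq]
    omega
  have hB : (PySem.List.slice r none (some (n.length : Int))).foldl
      (fun b x =>
        if (r.foldl (fun d x => d.insert x (d.getD x 0 + 1)) (PySem.Dict.empty : PySem.Dict Int Int)).getD x 0 = 3 then
          match b with
          | none => some x
          | some m => if x > m then some x else b
        else b) none
      = ((r.take n.length).filter (fun x => decide (PySem.List.count r x = 3))).foldl
          (fun b x => match b with | none => some x | some m => if x > m then some x else b)
          (none : Option Int) := by
    rw [PySem.List.slice_to_natCast, bestFold_eq_filter]
    congr 1
    exact List.filter_congr (fun x _ => by simp [hcnt x])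
  unfold maotrincarank maotrincarank_alt trincarankPort
  simp only [hA, hB]
  set cand := (r.take n.length).filter (fun x => decide (PySem.List.count r x = 3)) with hcand
  cases hs : PySem.List.sorted cand (fun x => x) true with
  | nil =>
    have hnil : cand = [] := by
      have h := (PySem.List.sorted_perm cand (fun x => x) true).symm
      rw [hs] at h
      exact h.eq_nil
    rw [hnil]
    rfl
  | cons m t =>
    have hne : cand ≠ [] := by
      intro h; rw [h] at hs; exact absurd hs (by simp [PySem.List.sorted])
    obtain ⟨M, hM, hmem, hub⟩ := maxFold_spec cand hne
    have hmM : m = M := by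
      have h1 : M ≤ m := PySem.List.key_head_sorted_rev_ge cand (fun x => x) hs M hmem
      have h2 : m ≤ M := hub m (by
        have hp := (PySem.List.sorted_perm cand (fun x => x) true).mem_iff (a := m)
        rw [hs] at hp
        exact hp.mp (List.mem_cons_self))
      omega
    rw [hM, hmM]
    exact lookup_eq_arith M

-- ===== VERDICT (by name: the statement is the Claim_ definition above) =====
theorem maotrincarank_spec : Claim_equal_maotrincarank := by
  intro r n _
  exact main_eq r n
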